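-- pv_equiv track=rewrite | github.com/eddieteall/ADSassignment | q4.py | is_sar
-- ===== SOURCE A (Python) =====
-- def is_sar(s):
--     total=0
--     prefix=0
--     for x in s:
--         prefix+=x
--         if prefix<0:
--              return False
--         total+=x
--
--     if total==0:
--         return True
--     else:
--         return False
-- ===== SOURCE B (Python) =====
-- def _summary(xs, lo, hi):
--     # (min prefix sum over all prefixes incl. empty, total sum) of xs[lo:hi]
--     if hi - lo == 0:
--         return (0, 0)
--     if hi - lo == 1:
--         return (min(0, xs[lo]), xs[lo])
--     mid = (lo + hi) // 2
--     m1, t1 = _summary(xs, lo, mid)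
--     m2, t2 = _summary(xs, mid, hi)
--     return (min(m1, t1 + m2), t1 + t2)
--
-- def is_sar(s):
--     xs = list(s)
--     m, t = _summary(xs, 0, len(xs))
--     return m >= 0 and t == 0
-- ===== Notes on version B (the rewrite author's own statement) =====
-- stated objective: alternative
-- what changed: Replaces A's single streaming loop with early return by a divide-and-conquer reduction: each half of the list is summarized as a (min-prefix-sum, total) pair, halves are merged with the monoid law (min(m1, t1+m2), t1+t2), and the answer is read off the root summary.
import Mathlib
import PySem

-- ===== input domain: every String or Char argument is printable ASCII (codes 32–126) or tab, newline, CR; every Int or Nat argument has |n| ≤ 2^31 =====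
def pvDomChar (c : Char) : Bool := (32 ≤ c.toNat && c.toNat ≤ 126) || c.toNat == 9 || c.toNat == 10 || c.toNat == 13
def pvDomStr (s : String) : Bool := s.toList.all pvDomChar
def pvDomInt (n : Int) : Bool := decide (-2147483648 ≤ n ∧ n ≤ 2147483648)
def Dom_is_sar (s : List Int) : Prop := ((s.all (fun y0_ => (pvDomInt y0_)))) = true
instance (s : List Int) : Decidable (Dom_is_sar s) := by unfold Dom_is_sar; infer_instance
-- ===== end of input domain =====

-- B replaces A's streaming loop (early return on a negative prefix) by a divide-and-conquer
-- reduction: each half is summarized as a (min-prefix-sum, total) pair and halves are merged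
-- with the monoid law (min(m1, t1+m2), t1+t2); same O(n) cost, different algorithm shape.

-- ===== PORT A =====
-- A's loop: state (total, prefix); early return False when prefix < 0, else total == 0 at the end.
def isSarLoop (s : List Int) (total prefi : Int) : Bool :=
  match s with
  | [] => total == 0
  | x :: rest =>
    if prefi + x < 0 then false
    else isSarLoop rest (total + x) (prefi + x)

def is_sar (s : List Int) : Bool := isSarLoop s 0 0

-- ===== PORT B =====
-- _summary(xs, lo, hi): (min prefix sum incl. the empty prefix, total) of xs[lo:hi].
-- xs.getD lo 0 ports xs[lo]: the recursion only reads indices with lo < hi <= len(xs), in bounds.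
-- The fuel parameter (hi - lo at the top call) is only a structural termination device.
def summaryGo (fuel : Nat) (xs : List Int) (lo hi : Nat) : Int × Int :=
  match fuel with
  | 0 => (0, 0)
  | f + 1 =>
    if hi - lo = 0 then (0, 0)
    else if hi - lo = 1 then (min 0 (xs.getD lo 0), xs.getD lo 0)
    else
      let mid := (lo + hi) / 2
      let s1 := summaryGo f xs lo mid
      let s2 := summaryGo f xs mid hi
      (min s1.1 (s1.2 + s2.1), s1.2 + s2.2)

def summaryB (xs : List Int) (lo hi : Nat) : Int × Int := summaryGo (hi - lo) xs lo hi

def is_sar_alt (s : List Int) : Bool :=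
  let st := summaryB s 0 s.length
  decide (0 ≤ st.1) && (st.2 == 0)

-- ===== PRECONDITION & SPEC =====
def Spec_is_sar (s : List Int) (out : Bool) : Prop := out = is_sar_alt s
instance (s : List Int) (out : Bool) : Decidable (Spec_is_sar s out) := by unfold Spec_is_sar; infer_instance

-- ===== CLAIM (what is proved, stated in full; the proofs are below) =====
def Claim_equal_is_sar : Prop := ∀ (s : List Int), Dom_is_sar s → Spec_is_sar s (is_sar s)

-- ===== LEMMAS AND PROOFS =====
-- min prefix sum of l, over all prefixes including the empty one
def mpf : List Int → Int
  | [] => 0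
  | x :: r => min 0 (x + mpf r)

theorem mpf_nonpos (l : List Int) : mpf l ≤ 0 := by
  cases l <;> simp [mpf]

theorem mpf_append (a b : List Int) : mpf (a ++ b) = min (mpf a) (a.sum + mpf b) := by
  induction a with
  | nil => have := mpf_nonpos b; simp [mpf]; omega
  | cons x r ih => simp [mpf, ih]; omega

theorem summaryGo_eq (xs : List Int) : ∀ (n lo hi : Nat), hi - lo ≤ n → hi ≤ xs.length →
    summaryGo n xs lo hi =
      (mpf ((xs.drop lo).take (hi - lo)), ((xs.drop lo).take (hi - lo)).sum) := by
  intro n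
  induction n with
  | zero =>
    intro lo hi h hlen
    simp [summaryGo, show hi - lo = 0 by omega, mpf]
  | succ n ih =>
    intro lo hi h hlen
    simp only [summaryGo]
    by_cases h0 : hi - lo = 0
    · simp [h0, mpf]
    · by_cases h1 : hi - lo = 1
      · have hlt : lo < xs.length := by omega
        have hd : xs.drop lo ≠ [] := by
          intro hc
          have := congrArg List.length hc
          simp at this; omega
        cases hdr : xs.drop lo with
        | nil => exact absurd hdr hd
        | cons y t =>
          have h' : xs[lo]? = some y := by rw [← List.head?_drop, hdr]; rfl
          simp [h1, h', mpf]
      · simp only [if_neg h0, if_neg h1]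
        have hmid1 : lo < (lo + hi) / 2 := by omega
        have hmid2 : (lo + hi) / 2 < hi := by omega
        rw [ih lo ((lo + hi) / 2) (by omega) (by omega),
            ih ((lo + hi) / 2) hi (by omega) hlen]
        have hsplit : (xs.drop lo).take (hi - lo) =
            (xs.drop lo).take ((lo + hi) / 2 - lo) ++
              (xs.drop ((lo + hi) / 2)).take (hi - (lo + hi) / 2) := by
          have hdd : xs.drop ((lo + hi) / 2) = (xs.drop lo).drop ((lo + hi) / 2 - lo) := by
            rw [List.drop_drop]; congr 1; omega
          rw [hdd, ← List.take_add]
          congr 1; omega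
        rw [hsplit, mpf_append, List.sum_append]

theorem isSarLoop_eq (s : List Int) : ∀ (t p : Int), 0 ≤ p →
    isSarLoop s t p = (decide (0 ≤ p + mpf s) && decide (t + s.sum = 0)) := by
  induction s with
  | nil =>
    intro t p hp
    simp [isSarLoop, mpf, hp]
    rfl
  | cons x rest ih =>
    intro t p hp
    simp only [isSarLoop, mpf]
    by_cases h : p + x < 0
    · have := mpf_nonpos rest
      simp [h, show ¬ (0 ≤ p + min 0 (x + mpf rest)) by omega]
    · have he : (0 ≤ p + x + mpf rest) ↔ (0 ≤ p + min 0 (x + mpf rest)) := by omega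
      rw [if_neg h, ih (t + x) (p + x) (by omega), decide_eq_decide.mpr he]
      simp only [List.sum_cons]
      congr 1
      exact decide_eq_decide.mpr (by omega)

-- ===== VERDICT (by name: the statement is the Claim_ definition above) =====
theorem is_sar_spec : Claim_equal_is_sar := by
  intro s _
  show is_sar s = is_sar_alt s
  unfold is_sar is_sar_alt summaryB
  rw [isSarLoop_eq s 0 0 le_rfl,
      summaryGo_eq s (s.length - 0) 0 s.length (by omega) le_rfl]
  simp only [List.drop_zero, Nat.sub_zero, List.take_length, Int.zero_add]
  rfl
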